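-- pv_equiv track=rewrite | github.com/Paradorn-248/Computer-Programming | Lab07/city_view.py | north
-- ===== SOURCE A (Python) =====
-- def north(size,map) :
--     res = 0
--     row,column = size[0],size[1]
--     for i in range(column) :
--         max = map[0][i]
--         for j in range(row) :
--             if max < map[j][i] :
--                 res += 1
--                 max = map[j][i]
--             else :
--                 continue
--     return res + column
-- ===== SOURCE B (Python) =====
-- def records(vals, m):
--     if not vals:
--         return 0
--     if vals[0] > m:
--         return 1 + records(vals[1:], vals[0])
--     return records(vals[1:], m)
--
--
-- def north(size, map):
--     row, column = size[0], size[1]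
--     return column + sum(records([map[j][i] for j in range(row)], map[0][i])
--                         for i in range(column))
-- ===== Notes on version B (the rewrite author's own statement) =====
-- stated objective: alternative
-- what changed: B materialises each column as a list and returns column plus the sum of a recursive record-counting helper over those columns, replacing A's nested index loops with mutable counter and running-max variables by a comprehension/sum over a structural recursion.
import Mathlib
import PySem

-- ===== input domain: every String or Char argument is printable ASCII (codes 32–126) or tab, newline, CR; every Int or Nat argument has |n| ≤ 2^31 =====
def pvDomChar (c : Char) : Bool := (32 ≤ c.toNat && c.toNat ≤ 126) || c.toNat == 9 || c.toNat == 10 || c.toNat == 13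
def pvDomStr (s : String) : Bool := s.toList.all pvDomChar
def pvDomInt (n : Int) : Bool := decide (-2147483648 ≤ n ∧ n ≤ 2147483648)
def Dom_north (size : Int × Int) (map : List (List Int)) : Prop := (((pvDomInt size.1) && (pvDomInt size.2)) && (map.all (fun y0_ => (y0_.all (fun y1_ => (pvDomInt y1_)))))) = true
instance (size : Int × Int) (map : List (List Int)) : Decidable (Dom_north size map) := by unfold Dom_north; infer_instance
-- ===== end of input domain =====

-- B decomposes differently: it materialises each column as a list and sums a recursive
-- record-counting helper over the columns, instead of A's nested index loops with
-- mutable counters (objective: alternative).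

-- ===== PORT A =====
def north (size : Int × Int) (map : List (List Int)) : Int :=
  let row := size.1
  let column := size.2
  let res := (PySem.List.pyRange 0 column 1).foldl (fun res i =>
    ((PySem.List.pyRange 0 row 1).foldl (fun (st : Int × Int) j =>
        if st.2 < PySem.List.pyGetD (PySem.List.pyGetD map j []) i 0 then
          (st.1 + 1, PySem.List.pyGetD (PySem.List.pyGetD map j []) i 0)
        else st)
      (res, PySem.List.pyGetD (PySem.List.pyGetD map 0 []) i 0)).1) 0
  res + column

-- ===== PORT B =====
-- recursive helper of Source B: number of strict running-max records in vals above seed m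
def records (vals : List Int) (m : Int) : Int :=
  match vals with
  | [] => 0
  | v :: rest => if v > m then 1 + records rest v else records rest m

def north_alt (size : Int × Int) (map : List (List Int)) : Int :=
  let row := size.1
  let column := size.2
  column + ((PySem.List.pyRange 0 column 1).map (fun i =>
      records ((PySem.List.pyRange 0 row 1).map (fun j =>
          PySem.List.pyGetD (PySem.List.pyGetD map j []) i 0))
        (PySem.List.pyGetD (PySem.List.pyGetD map 0 []) i 0))).sum

-- ===== PRECONDITION & SPEC =====
-- Pre_north excludes exactly the inputs on which Python A raises IndexError:
-- with column > 0, A reads map[0][i] for every i < column and map[j][i] for every j < row, i < column.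
def Pre_north (size : Int × Int) (map : List (List Int)) : Prop :=
  size.2 ≤ 0 ∨
    (map ≠ [] ∧ size.2 ≤ ((map.headD []).length : Int) ∧ size.1.toNat ≤ map.length ∧
      ∀ r ∈ map.take size.1.toNat, size.2 ≤ (r.length : Int))
instance (size : Int × Int) (map : List (List Int)) : Decidable (Pre_north size map) := by
  unfold Pre_north; infer_instance
def pvWitness_north : (Int × Int) × List (List Int) := ((2, 2), [[1, 2], [3, 0]])

def Spec_north (size : Int × Int) (map : List (List Int)) (out : Int) : Prop := out = north_alt size map
instance (size : Int × Int) (map : List (List Int)) (out : Int) : Decidable (Spec_north size map out) := by unfold Spec_north; infer_instance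

-- ===== CLAIM (what is proved, stated in full; the proofs are below) =====
def Claim_equal_north : Prop := ∀ (size : Int × Int) (map : List (List Int)), Dom_north size map → Pre_north size map → Spec_north size map (north size map)

-- ===== LEMMAS AND PROOFS =====

-- the counter of A's inner row loop computes B's recursive record count over the materialised column
theorem pvInner_records (g : Int → Int → Int) (i : Int) :
    ∀ (L : List Int) (m r : Int),
      (L.foldl (fun (st : Int × Int) j =>
          if st.2 < g j i then (st.1 + 1, g j i) else st) (r, m)).1
        = r + records (L.map (fun j => g j i)) m := by
  intro L
  induction L with
  | nil => intro m r; simp [records]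
  | cons j L ih =>
    intro m r
    simp only [List.foldl_cons, List.map_cons, records]
    by_cases h : m < g j i
    · rw [if_pos h, if_pos h, ih]; ring
    · rw [if_neg h, if_neg h, ih]

-- A's outer column loop is the sum of the per-column record counts
theorem pvOuter_sum (g : Int → Int → Int) (Lr : List Int) (li : List Int) :
    ∀ (r : Int),
      li.foldl (fun res i => (Lr.foldl (fun (st : Int × Int) j =>
          if st.2 < g j i then (st.1 + 1, g j i) else st) (res, g 0 i)).1) r
        = r + (li.map (fun i => records (Lr.map (fun j => g j i)) (g 0 i))).sum := by
  induction li with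
  | nil => intro r; simp
  | cons i li ih =>
    intro r
    simp only [List.foldl_cons, List.map_cons, List.sum_cons]
    rw [pvInner_records, ih]
    ring

theorem north_eq_all (size : Int × Int) (map : List (List Int)) :
    north size map = north_alt size map := by
  simp only [north, north_alt]
  rw [pvOuter_sum (fun j i => PySem.List.pyGetD (PySem.List.pyGetD map j []) i 0)
      (PySem.List.pyRange 0 size.1 1) (PySem.List.pyRange 0 size.2 1) 0]
  ring

-- ===== VERDICT (by name: the statement is the Claim_ definition above) =====
theorem north_spec : Claim_equal_north := by
  intro size map _ _
  unfold Spec_north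
  exact north_eq_all size map
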